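-- pv_equiv track=rewrite | github.com/viplocco/MuMuAINovel | backend/app/utils/markdown_helper.py | get_last_complete_section
-- ===== SOURCE A (Python) =====
-- def get_last_complete_section(markdown: str) -> str:
--     """
--     获取最后一个完整章节标题，用于续写定位
--
--     Args:
--         markdown: Markdown文本内容
--
--     Returns:
--         str: 最后一个章节标题（如 "### 权力结构"）
--     """
--     if not markdown:
--         return ""
--
--     lines = markdown.split('\n')
--     for line in reversed(lines):
--         # 匹配 ## 或 ### 开头的章节标题
--         if line.startswith('##') or line.startswith('###'):
--             return line.strip()
--
--     return ""
-- ===== SOURCE B (Python) =====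
-- def get_last_complete_section(markdown: str) -> str:
--     result = ""
--     for line in markdown.split('\n'):
--         if line.startswith('##'):
--             result = line
--     return result.strip()
-- ===== Notes on version B (the rewrite author's own statement) =====
-- stated objective: simpler
-- what changed: Replaces the reverse scan with early return (and the redundant second prefix test and the empty-input guard) by a single forward pass that overwrites an accumulator with each heading line, stripping the final value.
import Mathlib
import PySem

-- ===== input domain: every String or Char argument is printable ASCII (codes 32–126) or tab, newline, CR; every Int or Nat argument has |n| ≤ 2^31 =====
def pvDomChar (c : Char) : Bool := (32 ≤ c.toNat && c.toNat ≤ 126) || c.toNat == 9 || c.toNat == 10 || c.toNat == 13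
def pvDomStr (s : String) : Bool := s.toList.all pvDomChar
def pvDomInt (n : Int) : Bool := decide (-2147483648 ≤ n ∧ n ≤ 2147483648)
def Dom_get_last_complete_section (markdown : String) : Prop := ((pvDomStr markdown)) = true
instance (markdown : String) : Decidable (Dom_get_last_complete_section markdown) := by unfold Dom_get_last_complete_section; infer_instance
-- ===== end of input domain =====

-- B replaces A's reverse scan with early return (plus the subsumed second prefix test and the
-- empty-input guard) by one forward pass keeping the last heading line; objective: simpler.

-- ===== PORT A =====
-- A's reverse loop with early return: first match in the reversed line list.
def pvAFindRev : List (List Char) → List Char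
  | [] => []
  | line :: rest =>
    if PySem.Chars.startswith line ['#', '#'] || PySem.Chars.startswith line ['#', '#', '#'] then
      PySem.Chars.strip line
    else pvAFindRev rest

def get_last_complete_section (markdown : String) : String :=
  if markdown = "" then ""
  else String.ofList (pvAFindRev (PySem.Chars.splitOn markdown.toList ['\n']).reverse)

-- ===== PORT B =====
def get_last_complete_section_alt (markdown : String) : String :=
  String.ofList (PySem.Chars.strip
    ((PySem.Chars.splitOn markdown.toList ['\n']).foldl
      (fun result line => if PySem.Chars.startswith line ['#', '#'] then line else result) []))

-- ===== PRECONDITION & SPEC =====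
def Spec_get_last_complete_section (markdown : String) (out : String) : Prop := out = get_last_complete_section_alt markdown
instance (markdown : String) (out : String) : Decidable (Spec_get_last_complete_section markdown out) := by unfold Spec_get_last_complete_section; infer_instance

-- ===== CLAIM (what is proved, stated in full; the proofs are below) =====
def Claim_equal_get_last_complete_section : Prop := ∀ (markdown : String), Dom_get_last_complete_section markdown → Spec_get_last_complete_section markdown (get_last_complete_section markdown)

-- ===== LEMMAS AND PROOFS =====

-- A tests '## or ###'; since '###' starts with '##', the disjunction is just the '##' test.
theorem pv_cond_eq (l : List Char) :
    (PySem.Chars.startswith l ['#', '#'] || PySem.Chars.startswith l ['#', '#', '#'])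
      = PySem.Chars.startswith l ['#', '#'] := by
  cases h : PySem.Chars.startswith l ['#', '#', '#'] with
  | false => simp
  | true =>
    have h3 : (['#', '#', '#'] : List Char) <+: l := (PySem.Chars.startswith_iff l _).1 h
    have h2 : (['#', '#'] : List Char) <+: l :=
      List.IsPrefix.trans (by decide) h3
    simp [(PySem.Chars.startswith_iff l _).2 h2]

-- pvAFindRev with an explicit fallback accumulator.
def pvAFindRevAux (acc : List Char) : List (List Char) → List Char
  | [] => PySem.Chars.strip acc
  | line :: rest =>
    if PySem.Chars.startswith line ['#', '#'] then PySem.Chars.strip line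
    else pvAFindRevAux acc rest

theorem pvAFindRev_eq_aux (ls : List (List Char)) : pvAFindRev ls = pvAFindRevAux [] ls := by
  induction ls with
  | nil => decide
  | cons l rest ih =>
    simp only [pvAFindRev, pvAFindRevAux, pv_cond_eq, ih]

theorem pvAFindRevAux_append (ls : List (List Char)) (acc l : List Char) :
    pvAFindRevAux acc (ls ++ [l]) =
      pvAFindRevAux (if PySem.Chars.startswith l ['#', '#'] then l else acc) ls := by
  induction ls generalizing acc with
  | nil =>
    simp only [List.nil_append, pvAFindRevAux]
    split <;> simp
  | cons x xs ih =>
    simp only [List.cons_append, pvAFindRevAux, ih]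

theorem pv_rev_eq_fold (ls : List (List Char)) (acc : List Char) :
    pvAFindRevAux acc ls.reverse =
      PySem.Chars.strip (ls.foldl
        (fun result line => if PySem.Chars.startswith line ['#', '#'] then line else result) acc) := by
  induction ls generalizing acc with
  | nil => rfl
  | cons l rest ih =>
    simp only [List.reverse_cons, pvAFindRevAux_append, List.foldl_cons, ih]

-- ===== VERDICT (by name: the statement is the Claim_ definition above) =====
theorem get_last_complete_section_spec : Claim_equal_get_last_complete_section := by
  intro markdown _
  unfold Spec_get_last_complete_section get_last_complete_section get_last_complete_section_alt
  split
  · rename_i h; subst h; decide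
  · rw [pvAFindRev_eq_aux, pv_rev_eq_fold]
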